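-- pv_equiv track=rewrite | github.com/AirCraft009/Chess_game_2D | possible_moves.py | get_straights
-- ===== SOURCE A (Python) =====
-- offsets = {
--     "up": 8,
--     "down": -8,
--     "left": -1,
--     "right": 1,
--     "dia_r_up": 9,
--     "dia_r_down": -7,
--     "dia_l_up": 7,
--     "dia_l_down": -9
-- }
--
-- def get_straights(space):
--     u = []
--     r = []
--     d = []
--     l = []
--     straights = []
--     for x in range(4):
--         for y in range(1, 9):
--             if x == 0:
--                 up = (space + offsets["up"]*y)
--                 if up <= 56:
--                     u.append(up)
--             elif x == 1:
--                 right = (space + offsets["right"]*y)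
--                 if right%8 <= 7 and right // 8 == space // 8:
--                     r.append(right)
--             elif x == 2:
--                 down = (space + offsets["down"]*y)
--                 if down >= 0:
--                     d.append(down)
--             else:
--                 left = (space + offsets["left"]*y)
--                 if left%8 >= 0 and left // 8 == space // 8:
--                     l.append(left)
--
--     straights = [u, r, d, l]
--     return straights
-- ===== SOURCE B (Python) =====
-- def get_straights(space):
--     # Closed form: each direction's squares are a contiguous prefix of y = 1..8,
--     # whose length is computed arithmetically (no per-square validity test).
--     col = space % 8
--
--     def ray(step, k):
--         n = max(0, min(8, k))
--         return [space + step * y for y in range(1, n + 1)]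
--
--     return [ray(8, (56 - space) // 8),
--             ray(1, 7 - col),
--             ray(-8, space // 8),
--             ray(-1, col)]
-- ===== Notes on version B (the rewrite author's own statement) =====
-- stated objective: alternative
-- what changed: Replaces the range(4)*range(1,9) guarded enumeration with a closed form: each direction's valid squares are a contiguous prefix of y=1..8 whose length is computed arithmetically (clamped floor-division/modulo), so no per-square validity test remains.
import Mathlib
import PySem

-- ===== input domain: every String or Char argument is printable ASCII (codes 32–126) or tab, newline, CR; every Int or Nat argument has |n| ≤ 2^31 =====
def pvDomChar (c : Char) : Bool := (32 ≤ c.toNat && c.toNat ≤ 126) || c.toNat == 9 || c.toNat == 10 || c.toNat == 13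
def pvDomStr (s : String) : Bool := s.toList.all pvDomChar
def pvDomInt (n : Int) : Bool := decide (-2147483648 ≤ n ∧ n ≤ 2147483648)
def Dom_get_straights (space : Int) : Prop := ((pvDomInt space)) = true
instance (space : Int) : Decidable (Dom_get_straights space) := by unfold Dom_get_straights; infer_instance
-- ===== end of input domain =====

-- B replaces A's range(4) x range(1,9) guarded enumeration by a closed form: each direction's
-- squares are a contiguous prefix of y = 1..8 whose length is computed arithmetically (alternative).



-- ===== PORT A =====
-- module-level dict 'offsets'; every lookup in get_straights uses a present key, so getD is exact
def offsets : PySem.Dict String Int :=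
  PySem.Dict.ofList [("up", 8), ("down", -8), ("left", -1), ("right", 1),
    ("dia_r_up", 9), ("dia_r_down", -7), ("dia_l_up", 7), ("dia_l_down", -9)]

def get_straights (space : Int) : List (List Int) :=
  let st :=
    (PySem.List.pyRange 0 4 1).foldl (fun st x =>
      (PySem.List.pyRange 1 9 1).foldl (fun st y =>
        let (u, r, d, l) := st
        if x == 0 then
          let up := space + (offsets.getD "up" 0) * y
          if up ≤ 56 then (u ++ [up], r, d, l) else (u, r, d, l)
        else if x == 1 then
          let right := space + (offsets.getD "right" 0) * y
          if PySem.Int.mod right 8 ≤ 7 ∧ PySem.Int.floordiv right 8 = PySem.Int.floordiv space 8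
          then (u, r ++ [right], d, l) else (u, r, d, l)
        else if x == 2 then
          let down := space + (offsets.getD "down" 0) * y
          if down ≥ 0 then (u, r, d ++ [down], l) else (u, r, d, l)
        else
          let left := space + (offsets.getD "left" 0) * y
          if PySem.Int.mod left 8 ≥ 0 ∧ PySem.Int.floordiv left 8 = PySem.Int.floordiv space 8
          then (u, r, d, l ++ [left]) else (u, r, d, l)) st)
      (([], [], [], []) : List Int × List Int × List Int × List Int)
  [st.1, st.2.1, st.2.2.1, st.2.2.2]


-- ===== PORT B =====
-- ray: list comprehension [space + step*y for y in range(1, n+1)] with n = max(0, min(8, k))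
def rayB (space step k : Int) : List Int :=
  (PySem.List.pyRange 1 (max 0 (min 8 k) + 1) 1).map (fun y => space + step * y)

def get_straights_alt (space : Int) : List (List Int) :=
  let col := PySem.Int.mod space 8
  [rayB space 8 (PySem.Int.floordiv (56 - space) 8),
   rayB space 1 (7 - col),
   rayB space (-8) (PySem.Int.floordiv space 8),
   rayB space (-1) col]


-- ===== PRECONDITION & SPEC =====
def Spec_get_straights (space : Int) (out : List (List Int)) : Prop := out = get_straights_alt space
instance (space : Int) (out : List (List Int)) : Decidable (Spec_get_straights space out) := by unfold Spec_get_straights; infer_instance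

-- ===== CLAIM (what is proved, stated in full; the proofs are below) =====
def Claim_equal_get_straights : Prop := ∀ (space : Int), Dom_get_straights space → Spec_get_straights space (get_straights space)

-- ===== LEMMAS AND PROOFS =====

def pvSt := List Int × List Int × List Int × List Int

-- generic fold lemmas: A's inner loop only appends to one component
lemma fold1 (p : Int → Prop) [DecidablePred p] (v : Int → Int) :
    ∀ (ys : List Int) (u r d l : List Int),
    List.foldl (fun (st : pvSt) y => let (u,r,d,l) := st; if p y then (u ++ [v y], r, d, l) else (u,r,d,l)) (u,r,d,l) ys
      = (u ++ (ys.filter (fun y => decide (p y))).map v, r, d, l) := by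
  intro ys
  induction ys with
  | nil => intro u r d l; simp [pvSt]
  | cons y ys ih =>
    intro u r d l
    rw [List.foldl_cons]
    change List.foldl _ (if p y then (u ++ [v y], r, d, l) else (u,r,d,l)) ys = _
    by_cases h : p y
    · rw [if_pos h]; refine (ih _ _ _ _).trans ?_; simp [h]
    · rw [if_neg h]; refine (ih _ _ _ _).trans ?_; simp [h]

lemma fold2 (p : Int → Prop) [DecidablePred p] (v : Int → Int) :
    ∀ (ys : List Int) (u r d l : List Int),
    List.foldl (fun (st : pvSt) y => let (u,r,d,l) := st; if p y then (u, r ++ [v y], d, l) else (u,r,d,l)) (u,r,d,l) ys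
      = (u, r ++ (ys.filter (fun y => decide (p y))).map v, d, l) := by
  intro ys
  induction ys with
  | nil => intro u r d l; simp [pvSt]
  | cons y ys ih =>
    intro u r d l
    rw [List.foldl_cons]
    change List.foldl _ (if p y then (u, r ++ [v y], d, l) else (u,r,d,l)) ys = _
    by_cases h : p y
    · rw [if_pos h]; refine (ih _ _ _ _).trans ?_; simp [h]
    · rw [if_neg h]; refine (ih _ _ _ _).trans ?_; simp [h]

lemma fold3 (p : Int → Prop) [DecidablePred p] (v : Int → Int) :
    ∀ (ys : List Int) (u r d l : List Int),
    List.foldl (fun (st : pvSt) y => let (u,r,d,l) := st; if p y then (u, r, d ++ [v y], l) else (u,r,d,l)) (u,r,d,l) ys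
      = (u, r, d ++ (ys.filter (fun y => decide (p y))).map v, l) := by
  intro ys
  induction ys with
  | nil => intro u r d l; simp [pvSt]
  | cons y ys ih =>
    intro u r d l
    rw [List.foldl_cons]
    change List.foldl _ (if p y then (u, r, d ++ [v y], l) else (u,r,d,l)) ys = _
    by_cases h : p y
    · rw [if_pos h]; refine (ih _ _ _ _).trans ?_; simp [h]
    · rw [if_neg h]; refine (ih _ _ _ _).trans ?_; simp [h]

lemma fold4 (p : Int → Prop) [DecidablePred p] (v : Int → Int) :
    ∀ (ys : List Int) (u r d l : List Int),
    List.foldl (fun (st : pvSt) y => let (u,r,d,l) := st; if p y then (u, r, d, l ++ [v y]) else (u,r,d,l)) (u,r,d,l) ys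
      = (u, r, d, l ++ (ys.filter (fun y => decide (p y))).map v) := by
  intro ys
  induction ys with
  | nil => intro u r d l; simp [pvSt]
  | cons y ys ih =>
    intro u r d l
    rw [List.foldl_cons]
    change List.foldl _ (if p y then (u, r, d, l ++ [v y]) else (u,r,d,l)) ys = _
    by_cases h : p y
    · rw [if_pos h]; refine (ih _ _ _ _).trans ?_; simp [h]
    · rw [if_neg h]; refine (ih _ _ _ _).trans ?_; simp [h]

-- filtering y = 1..8 by 'y ≤ k' yields exactly pyRange 1 (clamp(k)+1)
lemma filter_le (k : Int) :
    ([1,2,3,4,5,6,7,8] : List Int).filter (fun y => decide (y ≤ k))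
      = PySem.List.pyRange 1 (max 0 (min 8 k) + 1) 1 := by
  by_cases h : k ≤ 0
  · have hm : max 0 (min 8 k) = 0 := by omega
    rw [hm, show PySem.List.pyRange 1 (0+1) 1 = ([] : List Int) from by decide]
    rw [List.filter_eq_nil_iff]
    intro y hy
    simp only [List.mem_cons, List.not_mem_nil, or_false] at hy
    simp only [decide_eq_true_eq, not_le]
    omega
  by_cases h8 : 8 ≤ k
  · have hm : max 0 (min 8 k) = 8 := by omega
    rw [hm, show PySem.List.pyRange 1 (8+1) 1 = ([1,2,3,4,5,6,7,8] : List Int) from by decide]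
    rw [List.filter_eq_self]
    intro y hy
    simp only [List.mem_cons, List.not_mem_nil, or_false] at hy
    simp only [decide_eq_true_eq]
    omega
  · have h1 : 1 ≤ k := by omega
    have h7 : k ≤ 7 := by omega
    interval_cases k <;> decide

-- per-direction bridges: the A-side filtered/mapped segment is rayB
lemma upB (space : Int) :
    (((([1,2,3,4,5,6,7,8] : List Int).filter (fun y => decide (space + 8*y ≤ 56))).map (fun y => space + 8*y)))
      = rayB space 8 (PySem.Int.floordiv (56 - space) 8) := by
  unfold rayB
  rw [PySem.Int.floordiv_eq_ediv_of_pos (by norm_num : (0:Int) < 8)]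
  rw [← filter_le ((56 - space) / 8)]
  apply congrArg
  apply List.filter_congr
  intro y hy
  simp only [List.mem_cons, List.not_mem_nil, or_false] at hy
  simp only [decide_eq_decide]
  omega

lemma rightB (space : Int) :
    (((([1,2,3,4,5,6,7,8] : List Int).filter
        (fun y => decide (PySem.Int.mod (space + 1*y) 8 ≤ 7 ∧
                   PySem.Int.floordiv (space + 1*y) 8 = PySem.Int.floordiv space 8))).map (fun y => space + 1*y)))
      = rayB space 1 (7 - PySem.Int.mod space 8) := by
  unfold rayB
  rw [PySem.Int.mod_eq_emod_of_pos (by norm_num : (0:Int) < 8)]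
  rw [← filter_le (7 - space % 8)]
  apply congrArg
  apply List.filter_congr
  intro y hy
  simp only [List.mem_cons, List.not_mem_nil, or_false] at hy
  simp only [PySem.Int.mod_eq_emod_of_pos (by norm_num : (0:Int) < 8),
    PySem.Int.floordiv_eq_ediv_of_pos (by norm_num : (0:Int) < 8), decide_eq_decide]
  omega

lemma downB (space : Int) :
    (((([1,2,3,4,5,6,7,8] : List Int).filter (fun y => decide (space + (-8)*y ≥ 0))).map (fun y => space + (-8)*y)))
      = rayB space (-8) (PySem.Int.floordiv space 8) := by
  unfold rayB
  rw [PySem.Int.floordiv_eq_ediv_of_pos (by norm_num : (0:Int) < 8)]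
  rw [← filter_le (space / 8)]
  apply congrArg
  apply List.filter_congr
  intro y hy
  simp only [List.mem_cons, List.not_mem_nil, or_false] at hy
  simp only [decide_eq_decide]
  omega

lemma leftB (space : Int) :
    (((([1,2,3,4,5,6,7,8] : List Int).filter
        (fun y => decide (PySem.Int.mod (space + (-1)*y) 8 ≥ 0 ∧
                   PySem.Int.floordiv (space + (-1)*y) 8 = PySem.Int.floordiv space 8))).map (fun y => space + (-1)*y)))
      = rayB space (-1) (PySem.Int.mod space 8) := by
  unfold rayB
  rw [PySem.Int.mod_eq_emod_of_pos (by norm_num : (0:Int) < 8)]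
  rw [← filter_le (space % 8)]
  apply congrArg
  apply List.filter_congr
  intro y hy
  simp only [List.mem_cons, List.not_mem_nil, or_false] at hy
  simp only [PySem.Int.mod_eq_emod_of_pos (by norm_num : (0:Int) < 8),
    PySem.Int.floordiv_eq_ediv_of_pos (by norm_num : (0:Int) < 8), decide_eq_decide]
  omega

-- ===== VERDICT (by name: the statement is the Claim_ definition above) =====
theorem get_straights_spec : Claim_equal_get_straights := by
  intro space _
  unfold Spec_get_straights
  have e0 : List.foldl (fun (st : pvSt) y => let (u,r,d,l) := st;
        if space + 8*y ≤ 56 then (u ++ [space + 8*y], r, d, l) else (u,r,d,l))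
      (([],[],[],[]) : pvSt) [1,2,3,4,5,6,7,8]
      = (rayB space 8 (PySem.Int.floordiv (56 - space) 8), [], [], []) := by
    refine (fold1 (fun y => space + 8*y ≤ 56) (fun y => space + 8*y) _ [] [] [] []).trans ?_
    rw [← upB space]; simp
  have e1 : List.foldl (fun (st : pvSt) y => let (u,r,d,l) := st;
        if PySem.Int.mod (space + 1*y) 8 ≤ 7 ∧ PySem.Int.floordiv (space + 1*y) 8 = PySem.Int.floordiv space 8
        then (u, r ++ [space + 1*y], d, l) else (u,r,d,l))
      ((rayB space 8 (PySem.Int.floordiv (56 - space) 8), [], [], []) : pvSt) [1,2,3,4,5,6,7,8]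
      = (rayB space 8 (PySem.Int.floordiv (56 - space) 8),
         rayB space 1 (7 - PySem.Int.mod space 8), [], []) := by
    refine (fold2 (fun y => PySem.Int.mod (space + 1*y) 8 ≤ 7 ∧ PySem.Int.floordiv (space + 1*y) 8 = PySem.Int.floordiv space 8)
        (fun y => space + 1*y) _ _ [] [] []).trans ?_
    rw [← rightB space]; simp
  have e2 : List.foldl (fun (st : pvSt) y => let (u,r,d,l) := st;
        if space + (-8)*y ≥ 0 then (u, r, d ++ [space + (-8)*y], l) else (u,r,d,l))
      ((rayB space 8 (PySem.Int.floordiv (56 - space) 8),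
        rayB space 1 (7 - PySem.Int.mod space 8), [], []) : pvSt) [1,2,3,4,5,6,7,8]
      = (rayB space 8 (PySem.Int.floordiv (56 - space) 8),
         rayB space 1 (7 - PySem.Int.mod space 8),
         rayB space (-8) (PySem.Int.floordiv space 8), []) := by
    refine (fold3 (fun y => space + (-8)*y ≥ 0) (fun y => space + (-8)*y) _ _ _ [] []).trans ?_
    rw [← downB space]; simp
  have e3 : List.foldl (fun (st : pvSt) y => let (u,r,d,l) := st;
        if PySem.Int.mod (space + (-1)*y) 8 ≥ 0 ∧ PySem.Int.floordiv (space + (-1)*y) 8 = PySem.Int.floordiv space 8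
        then (u, r, d, l ++ [space + (-1)*y]) else (u,r,d,l))
      ((rayB space 8 (PySem.Int.floordiv (56 - space) 8),
        rayB space 1 (7 - PySem.Int.mod space 8),
        rayB space (-8) (PySem.Int.floordiv space 8), []) : pvSt) [1,2,3,4,5,6,7,8]
      = (rayB space 8 (PySem.Int.floordiv (56 - space) 8),
         rayB space 1 (7 - PySem.Int.mod space 8),
         rayB space (-8) (PySem.Int.floordiv space 8),
         rayB space (-1) (PySem.Int.mod space 8)) := by
    refine (fold4 (fun y => PySem.Int.mod (space + (-1)*y) 8 ≥ 0 ∧ PySem.Int.floordiv (space + (-1)*y) 8 = PySem.Int.floordiv space 8)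
        (fun y => space + (-1)*y) _ _ _ _ []).trans ?_
    rw [← leftB space]; simp
  have key : (PySem.List.pyRange 0 4 1).foldl (fun st x =>
      (PySem.List.pyRange 1 9 1).foldl (fun st y =>
        let (u, r, d, l) := st
        if x == 0 then
          let up := space + (offsets.getD "up" 0) * y
          if up ≤ 56 then (u ++ [up], r, d, l) else (u, r, d, l)
        else if x == 1 then
          let right := space + (offsets.getD "right" 0) * y
          if PySem.Int.mod right 8 ≤ 7 ∧ PySem.Int.floordiv right 8 = PySem.Int.floordiv space 8
          then (u, r ++ [right], d, l) else (u, r, d, l)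
        else if x == 2 then
          let down := space + (offsets.getD "down" 0) * y
          if down ≥ 0 then (u, r, d ++ [down], l) else (u, r, d, l)
        else
          let left := space + (offsets.getD "left" 0) * y
          if PySem.Int.mod left 8 ≥ 0 ∧ PySem.Int.floordiv left 8 = PySem.Int.floordiv space 8
          then (u, r, d, l ++ [left]) else (u, r, d, l)) st)
      (([], [], [], []) : pvSt)
      = (rayB space 8 (PySem.Int.floordiv (56 - space) 8),
         rayB space 1 (7 - PySem.Int.mod space 8),
         rayB space (-8) (PySem.Int.floordiv space 8),
         rayB space (-1) (PySem.Int.mod space 8)) := by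
    rw [show PySem.List.pyRange 0 4 1 = [0,1,2,3] from by decide]
    rw [List.foldl_cons, List.foldl_cons, List.foldl_cons, List.foldl_cons, List.foldl_nil]
    change List.foldl (fun (st : pvSt) y => let (u,r,d,l) := st;
        if PySem.Int.mod (space + (-1)*y) 8 ≥ 0 ∧ PySem.Int.floordiv (space + (-1)*y) 8 = PySem.Int.floordiv space 8
        then (u, r, d, l ++ [space + (-1)*y]) else (u,r,d,l))
      (List.foldl (fun (st : pvSt) y => let (u,r,d,l) := st;
        if space + (-8)*y ≥ 0 then (u, r, d ++ [space + (-8)*y], l) else (u,r,d,l))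
      (List.foldl (fun (st : pvSt) y => let (u,r,d,l) := st;
        if PySem.Int.mod (space + 1*y) 8 ≤ 7 ∧ PySem.Int.floordiv (space + 1*y) 8 = PySem.Int.floordiv space 8
        then (u, r ++ [space + 1*y], d, l) else (u,r,d,l))
      (List.foldl (fun (st : pvSt) y => let (u,r,d,l) := st;
        if space + 8*y ≤ 56 then (u ++ [space + 8*y], r, d, l) else (u,r,d,l))
      (([],[],[],[]) : pvSt) [1,2,3,4,5,6,7,8]) [1,2,3,4,5,6,7,8]) [1,2,3,4,5,6,7,8]) [1,2,3,4,5,6,7,8] = _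
    rw [e0, e1, e2, e3]
  show _ = get_straights_alt space
  unfold get_straights
  rw [key]
  rfl
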